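-- pv_equiv track=rewrite | github.com/mawar108/HardwarenaheProgrammierung_in_C_4 | containers/generate_expected.py | magic
-- ===== SOURCE A (Python) =====
-- import itertools as it
-- import operator
--
-- def magic(c_ids, w_ids):
--     containers = {key:[v[0] for v in value] for key, value in it.groupby(sorted(c_ids, key=operator.itemgetter(1)), operator.itemgetter(1))}
--     warehouses = dict(w_ids)
--     files = {warehouses[_id]:containers[_id] for _id in containers}
--     for id_ in warehouses:
--         try:
--             files[warehouses[id_]]
--         except KeyError:
--             files[warehouses[id_]] = []
--     return files
-- ===== SOURCE B (Python) =====
-- def magic(c_ids, w_ids):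
--     # one-pass hash grouping instead of sort+groupby; keys sorted afterwards
--     containers = {}
--     for cid, wid in c_ids:
--         containers.setdefault(wid, []).append(cid)
--     warehouses = dict(w_ids)
--     files = {}
--     for wid in sorted(containers):
--         files[warehouses[wid]] = containers[wid]
--     for wid in warehouses:
--         name = warehouses[wid]
--         if name not in files:
--             files[name] = []
--     return files
-- ===== Notes on version B (the rewrite author's own statement) =====
-- stated objective: idiomatic
-- what changed: Replaces A's sort-all-pairs + itertools.groupby pipeline by a single setdefault/append grouping pass over c_ids followed by sorting only the distinct warehouse ids, and replaces the try/except presence probe by a plain 'not in' test.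
import Mathlib
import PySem

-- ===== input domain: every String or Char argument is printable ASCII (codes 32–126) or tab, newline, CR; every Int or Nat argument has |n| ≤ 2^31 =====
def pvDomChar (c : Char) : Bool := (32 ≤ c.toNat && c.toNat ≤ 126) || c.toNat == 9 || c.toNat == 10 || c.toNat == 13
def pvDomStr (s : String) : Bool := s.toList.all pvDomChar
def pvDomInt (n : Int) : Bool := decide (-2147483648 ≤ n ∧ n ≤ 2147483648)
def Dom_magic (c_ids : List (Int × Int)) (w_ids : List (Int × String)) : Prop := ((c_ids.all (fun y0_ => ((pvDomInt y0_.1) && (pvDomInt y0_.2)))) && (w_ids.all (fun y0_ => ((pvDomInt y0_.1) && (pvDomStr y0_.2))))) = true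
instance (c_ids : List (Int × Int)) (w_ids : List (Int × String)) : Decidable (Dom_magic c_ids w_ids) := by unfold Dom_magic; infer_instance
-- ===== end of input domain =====

-- B replaces A's sort-all-pairs + itertools.groupby by a single setdefault/append pass
-- over c_ids followed by a sort of the distinct warehouse ids (idiomatic hash grouping).

-- ===== PORT A =====
-- itertools.groupby over a list: consecutive runs of equal keys (key = second component)
def magicGroupby : List (Int × Int) → List (Int × List (Int × Int))
  | [] => []
  | p :: rest =>
    match magicGroupby rest with
    | [] => [(p.2, [p])]
    | (k, g) :: gs => if p.2 = k then (k, p :: g) :: gs else (p.2, [p]) :: (k, g) :: gs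

def magic (c_ids : List (Int × Int)) (w_ids : List (Int × String)) : List (String × List Int) :=
  let sortedC := PySem.List.sorted c_ids (fun p => p.2)
  let containers : PySem.Dict Int (List Int) :=
    (magicGroupby sortedC).foldl (fun d kg => d.insert kg.1 (kg.2.map (fun v => v.1))) PySem.Dict.empty
  let warehouses : PySem.Dict Int String :=
    w_ids.foldl (fun d p => d.insert p.1 p.2) PySem.Dict.empty
  -- warehouses[_id]: exact on Pre_magic (key present); getD "" stands where Python raises KeyError
  let files : PySem.Dict String (List Int) :=
    containers.keys.foldl (fun f i => f.insert (warehouses.getD i "") (containers.getD i [])) PySem.Dict.empty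
  let files2 : PySem.Dict String (List Int) :=
    warehouses.keys.foldl (fun f i =>
      match f.get? (warehouses.getD i "") with
      | some _ => f
      | none => f.insert (warehouses.getD i "") []) files
  files2.items

-- ===== PORT B =====
def magic_alt (c_ids : List (Int × Int)) (w_ids : List (Int × String)) : List (String × List Int) :=
  let containers : PySem.Dict Int (List Int) :=
    c_ids.foldl (fun d p => d.modify p.2 [] (fun l => l ++ [p.1])) PySem.Dict.empty
  let warehouses : PySem.Dict Int String :=
    w_ids.foldl (fun d p => d.insert p.1 p.2) PySem.Dict.empty
  -- warehouses[wid]: exact on Pre_magic (key present); getD "" stands where Python raises KeyError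
  let files : PySem.Dict String (List Int) :=
    (PySem.List.sorted containers.keys (fun k => k)).foldl
      (fun f i => f.insert (warehouses.getD i "") (containers.getD i [])) PySem.Dict.empty
  let files2 : PySem.Dict String (List Int) :=
    warehouses.keys.foldl (fun f i =>
      if f.contains (warehouses.getD i "") then f else f.insert (warehouses.getD i "") []) files
  files2.items

-- ===== PRECONDITION & SPEC =====
-- Pre_ excludes exactly the inputs where a container's warehouse id is missing from w_ids:
-- there Python A (and Python B) raise KeyError.
def Pre_magic (c_ids : List (Int × Int)) (w_ids : List (Int × String)) : Prop :=
  ∀ p ∈ c_ids, p.2 ∈ w_ids.map Prod.fst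
instance (c_ids : List (Int × Int)) (w_ids : List (Int × String)) : Decidable (Pre_magic c_ids w_ids) := by unfold Pre_magic; infer_instance

def pvWitness_magic : (List (Int × Int)) × (List (Int × String)) := ([(1, 5), (2, 6), (3, 5)], [(5, "w"), (6, "x"), (7, "y")])

def Spec_magic (c_ids : List (Int × Int)) (w_ids : List (Int × String)) (out : List (String × List Int)) : Prop := out = magic_alt c_ids w_ids
instance (c_ids : List (Int × Int)) (w_ids : List (Int × String)) (out : List (String × List Int)) : Decidable (Spec_magic c_ids w_ids out) := by unfold Spec_magic; infer_instance

-- ===== CLAIM (what is proved, stated in full; the proofs are below) =====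
def Claim_equal_magic : Prop := ∀ (c_ids : List (Int × Int)) (w_ids : List (Int × String)), Dom_magic c_ids w_ids → Pre_magic c_ids w_ids → Spec_magic c_ids w_ids (magic c_ids w_ids)

-- ===== LEMMAS AND PROOFS =====

-- Stability of insertBy on a key-sorted accumulator: per-key filter just appends
lemma filt_insertBy (k : Int) (x : Int × Int) (acc : List (Int × Int))
    (h : acc.Pairwise (fun a b => a.2 ≤ b.2)) :
    (PySem.List.insertBy (fun a b => decide (a.2 < b.2)) x acc).filter (fun p => p.2 == k)
      = acc.filter (fun p => p.2 == k) ++ (if x.2 = k then [x] else []) := by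
  induction acc with
  | nil => simp [PySem.List.insertBy]; split <;> simp_all
  | cons y ys ih =>
    obtain ⟨hy, hys⟩ := List.pairwise_cons.1 h
    rw [PySem.List.insertBy.eq_2]
    by_cases hlt : x.2 < y.2
    · simp only [hlt, decide_true, if_true]
      have hnil : (y :: ys).filter (fun p => p.2 == k) = [] ∨ ¬ x.2 = k := by
        by_cases hxk : x.2 = k
        · left; rw [List.filter_eq_nil_iff]; intro q hq
          have : y.2 ≤ q.2 := by
            rcases hq with _ | hq
            · exact le_refl _
            · exact hy q (by assumption)
          simp only [beq_iff_eq]; omega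
        · right; exact hxk
      rcases hnil with hnil | hxk
      · by_cases hxk : x.2 = k
        · simp [hxk, hnil]
        · simp only [List.filter_cons, beq_iff_eq, hxk, if_false, if_neg hxk, List.append_nil]
      · simp [List.filter_cons, hxk]
    · simp only [hlt, decide_false, Bool.false_eq_true, if_false]
      rw [List.filter_cons, List.filter_cons, ih hys]
      by_cases hyk : y.2 = k <;> simp [hyk]

-- Filtering by a key commutes with the stable sort (stability per key)
lemma filt_foldl (k : Int) (c acc : List (Int × Int))
    (h : acc.Pairwise (fun a b => a.2 ≤ b.2)) :
    (c.foldl (fun a x => PySem.List.insertBy (fun a b => decide (a.2 < b.2)) x a) acc).filter (fun p => p.2 == k)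
      = acc.filter (fun p => p.2 == k) ++ c.filter (fun p => p.2 == k) := by
  induction c generalizing acc with
  | nil => simp
  | cons p cs ih =>
    rw [List.foldl_cons, ih _ (PySem.List.insertBy_pairwise_le (fun a => a.2) p acc h),
        filt_insertBy k p acc h, List.filter_cons]
    by_cases hpk : p.2 = k <;> simp [hpk]

lemma filt_sorted (c : List (Int × Int)) (k : Int) :
    (PySem.List.sorted c (fun p => p.2)).filter (fun p => p.2 == k) = c.filter (fun p => p.2 == k) := by
  rw [PySem.List.sorted_eq_foldl_insertBy]
  simpa using filt_foldl k c [] (by simp)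

-- Characterisation of groupby on a key-sorted list: strictly increasing keys,
-- keys = keys occurring in the list, each group = the per-key filter
lemma gb (ys : List (Int × Int)) (h : ys.Pairwise (fun a b => a.2 ≤ b.2)) :
    ((magicGroupby ys).map Prod.fst).Pairwise (· < ·)
  ∧ (∀ k, k ∈ (magicGroupby ys).map Prod.fst ↔ k ∈ ys.map (fun p => p.2))
  ∧ (∀ kg ∈ magicGroupby ys, kg.2 = ys.filter (fun p => p.2 == kg.1)) := by
  induction ys with
  | nil => simp [magicGroupby]
  | cons p rest ih =>
    obtain ⟨hp, hrest⟩ := List.pairwise_cons.1 h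
    obtain ⟨ih1, ih2, ih3⟩ := ih hrest
    cases hgb : magicGroupby rest with
    | nil =>
      have hre : rest = [] := by
        cases rest with
        | nil => rfl
        | cons q qs => exact absurd ((ih2 q.2).2 (by simp)) (by simp [hgb])
      subst hre
      simp [magicGroupby]
    | cons kg gs =>
      obtain ⟨k, g⟩ := kg
      have hk_mem : k ∈ rest.map (fun p => p.2) := (ih2 k).1 (by simp [hgb])
      have hple : p.2 ≤ k := by
        obtain ⟨q, hq, hq2⟩ := List.mem_map.1 hk_mem
        exact hq2 ▸ hp q hq
      rw [hgb] at ih1 ih2 ih3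
      have hgs_gt : ∀ k' ∈ gs.map Prod.fst, k < k' := by
        have hpw : List.Pairwise (fun a b : Int => a < b) (k :: gs.map Prod.fst) := by
          simpa using ih1
        exact (List.pairwise_cons.1 hpw).1
      by_cases hpk : p.2 = k
      · simp only [magicGroupby, hgb, hpk, if_true]
        refine ⟨by simpa using ih1, ?_, ?_⟩
        · intro k'
          constructor
          · intro hk'
            rcases (by simpa using hk' : k' = k ∨ k' ∈ gs.map Prod.fst) with rfl | hk'
            · simp [← hpk]
            · simp only [List.map_cons, List.mem_cons]
              exact Or.inr ((ih2 k').1 (by simp [hk']))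
          · intro hk'
            rcases (by simpa using hk' : k' = p.2 ∨ k' ∈ rest.map (fun p => p.2)) with rfl | hk'
            · simp [hpk]
            · simpa using (ih2 k').2 (by simpa using hk')
        · intro kg' hmem
          rcases (by simpa using hmem : kg' = (k, p :: g) ∨ kg' ∈ gs) with rfl | hmem
          · have hg : g = rest.filter (fun p => p.2 == k) := ih3 (k, g) (by simp)
            simp [hpk, hg]
          · have hne : p.2 ≠ kg'.1 := by
              have : k < kg'.1 := hgs_gt kg'.1 (List.mem_map.2 ⟨kg', hmem, rfl⟩)
              omega
            rw [List.filter_cons, if_neg (by simpa using hne)]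
            exact ih3 kg' (by simp [hmem])
      · have hplt : p.2 < k := lt_of_le_of_ne hple hpk
        simp only [magicGroupby, hgb, hpk, if_false]
        have hrest_ge : ∀ k' ∈ rest.map (fun p => p.2), p.2 < k' := by
          intro k' hk'
          rcases (by simpa using (ih2 k').2 hk' : k' = k ∨ k' ∈ gs.map Prod.fst) with rfl | hk2
          · exact hplt
          · exact lt_trans hplt (hgs_gt k' hk2)
        refine ⟨?_, ?_, ?_⟩
        · refine List.pairwise_cons.2 ⟨?_, by simpa using ih1⟩
          intro k' hk'
          rcases (by simpa using hk' : k' = k ∨ k' ∈ gs.map Prod.fst) with rfl | hk'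
          · exact hplt
          · exact lt_trans hplt (hgs_gt k' hk')
        · intro k'
          constructor
          · intro hk'
            rcases (by simpa using hk' : k' = p.2 ∨ (k' = k ∨ k' ∈ gs.map Prod.fst)) with rfl | hk'
            · simp
            · have h5 : k' ∈ rest.map (fun p => p.2) := (ih2 k').1 (by simpa using hk')
              simp only [List.map_cons, List.mem_cons]
              exact Or.inr h5
          · intro hk'
            rcases (by simpa using hk' : k' = p.2 ∨ k' ∈ rest.map (fun p => p.2)) with rfl | hk'
            · simp
            · have h6 := (ih2 k').2 hk'
              simp only [List.map_cons, List.mem_cons] at h6 ⊢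
              tauto
        · intro kg' hmem
          rcases (by simpa using hmem : kg' = (p.2, [p]) ∨ (kg' = (k, g) ∨ kg' ∈ gs)) with rfl | hmem
          · have hnil : rest.filter (fun q => q.2 == p.2) = [] := by
              rw [List.filter_eq_nil_iff]
              intro q hq
              have : p.2 < q.2 := hrest_ge q.2 (List.mem_map.2 ⟨q, hq, rfl⟩)
              simp only [beq_iff_eq]; omega
            simp [hnil]
          · have hmem' : kg' ∈ (k, g) :: gs := by simpa using hmem
            have hne : p.2 ≠ kg'.1 := by
              have : kg'.1 ∈ rest.map (fun p => p.2) := (ih2 kg'.1).1 (by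
                rcases hmem with rfl | hmem
                · simp
                · simp only [List.map_cons, List.mem_cons]
                  exact Or.inr (List.mem_map.2 ⟨kg', hmem, rfl⟩))
              have := hrest_ge kg'.1 this
              omega
            rw [List.filter_cons, if_neg (by simpa using hne)]
            exact ih3 kg' hmem'

-- ----- A's containers dict -----

lemma nodup_keysA (c : List (Int × Int)) :
    ((magicGroupby (PySem.List.sorted c (fun p => p.2))).map Prod.fst).Nodup := by
  obtain ⟨h1, -, -⟩ := gb _ (PySem.List.sorted_pairwise c (fun p => p.2))
  exact h1.imp (fun h => ne_of_lt h)

lemma gbA (c : List (Int × Int)) :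
    (∀ k, k ∈ (magicGroupby (PySem.List.sorted c (fun p => p.2))).map Prod.fst ↔ k ∈ c.map (fun p => p.2))
  ∧ (∀ kg ∈ magicGroupby (PySem.List.sorted c (fun p => p.2)), kg.2 = c.filter (fun p => p.2 == kg.1)) := by
  obtain ⟨-, h2, h3⟩ := gb _ (PySem.List.sorted_pairwise c (fun p => p.2))
  refine ⟨?_, ?_⟩
  · intro k
    rw [h2]
    exact ((PySem.List.sorted_perm c (fun p => p.2) false).map (fun p => p.2)).mem_iff
  · intro kg h
    rw [h3 kg h, filt_sorted]

lemma itemsA (c : List (Int × Int)) :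
    ((magicGroupby (PySem.List.sorted c (fun p => p.2))).foldl
        (fun d kg => d.insert kg.1 (kg.2.map (fun v => v.1))) PySem.Dict.empty).items
      = (magicGroupby (PySem.List.sorted c (fun p => p.2))).map
          (fun kg => (kg.1, kg.2.map (fun v => v.1))) := by
  have h := PySem.Dict.items_foldl_insert_fresh
    (l := magicGroupby (PySem.List.sorted c (fun p => p.2)))
    (k := Prod.fst) (v := fun kg => kg.2.map (fun v => v.1)) (d := PySem.Dict.empty)
    (fun a _ => PySem.Dict.contains_empty a.1) (nodup_keysA c)
  simpa using h

lemma keysA_eq (c : List (Int × Int)) :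
    ((magicGroupby (PySem.List.sorted c (fun p => p.2))).foldl
        (fun d kg => d.insert kg.1 (kg.2.map (fun v => v.1))) PySem.Dict.empty).keys
      = (magicGroupby (PySem.List.sorted c (fun p => p.2))).map Prod.fst := by
  rw [PySem.Dict.keys.eq_1, itemsA, List.map_map]
  rfl

lemma getD_A (c : List (Int × Int)) (k : Int)
    (hk : k ∈ (magicGroupby (PySem.List.sorted c (fun p => p.2))).map Prod.fst) :
    ((magicGroupby (PySem.List.sorted c (fun p => p.2))).foldl
        (fun d kg => d.insert kg.1 (kg.2.map (fun v => v.1))) PySem.Dict.empty).getD k []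
      = (c.filter (fun p => p.2 == k)).map (fun v => v.1) := by
  obtain ⟨kg, hkg, rfl⟩ := List.mem_map.1 hk
  have hmem : (kg.1, kg.2.map (fun v => v.1)) ∈
      ((magicGroupby (PySem.List.sorted c (fun p => p.2))).foldl
        (fun d kg => d.insert kg.1 (kg.2.map (fun v => v.1))) PySem.Dict.empty).items := by
    rw [itemsA]
    exact List.mem_map.2 ⟨kg, hkg, rfl⟩
  rw [PySem.Dict.getD_of_mem_items _ hmem (by rw [keysA_eq]; exact nodup_keysA c) [],
      (gbA c).2 kg hkg]

-- ----- B's containers dict -----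

lemma keysB_spec (c : List (Int × Int)) :
    (c.foldl (fun d p => d.modify p.2 [] (fun l => l ++ [p.1]))
        (PySem.Dict.empty : PySem.Dict Int (List Int))).keys
      = PySem.Set.update [] (c.map (fun p => p.2)) := by
  have h := PySem.Dict.keys_foldl_modify_key (l := c) (key := fun p => p.2)
    (d0 := ([] : List Int)) (f := fun _ p => fun l => l ++ [p.1]) (d := PySem.Dict.empty)
  simpa [PySem.Dict.keys_empty] using h

lemma getD_B (c : List (Int × Int)) (k : Int) :
    (c.foldl (fun d p => d.modify p.2 [] (fun l => l ++ [p.1]))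
        (PySem.Dict.empty : PySem.Dict Int (List Int))).getD k []
      = (c.filter (fun p => p.2 == k)).map (fun v => v.1) := by
  have h := PySem.Dict.getD_foldl_modify_append
    (l := c.map (fun p => (p.2, p.1))) (d := (PySem.Dict.empty : PySem.Dict Int (List Int))) (c := k)
  rw [List.foldl_map] at h
  simpa [List.filter_map, List.map_map, Function.comp] using h

lemma sortedKeysB (c : List (Int × Int)) :
    PySem.List.sorted
        (c.foldl (fun d p => d.modify p.2 [] (fun l => l ++ [p.1]))
          (PySem.Dict.empty : PySem.Dict Int (List Int))).keys (fun k => k)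
      = (magicGroupby (PySem.List.sorted c (fun p => p.2))).map Prod.fst := by
  apply PySem.List.sorted_eq_of_perm_of_pairwise_lt
  · apply List.perm_of_nodup_nodup_toFinset_eq (nodup_keysA c)
    · rw [keysB_spec]
      exact PySem.Set.nodup_update [] _ (by simp)
    · ext k
      simp only [List.mem_toFinset]
      rw [(gbA c).1, keysB_spec, PySem.Set.mem_update]
      simp
  · exact (gb _ (PySem.List.sorted_pairwise c (fun p => p.2))).1

-- phase-2 steps of the two ports agree on every dict
lemma phase2_step (f : PySem.Dict String (List Int)) (n : String) :
    (match f.get? n with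
      | some _ => f
      | none => f.insert n []) =
    (if f.contains n then f else f.insert n []) := by
  rw [PySem.Dict.contains_eq_isSome_get?]
  cases f.get? n <;> simp

lemma magic_eq (c_ids : List (Int × Int)) (w_ids : List (Int × String)) :
    magic c_ids w_ids = magic_alt c_ids w_ids := by
  simp only [magic, magic_alt]
  rw [sortedKeysB, keysA_eq]
  have h1 :
      ((magicGroupby (PySem.List.sorted c_ids (fun p => p.2))).map Prod.fst).foldl
        (fun f i => f.insert ((w_ids.foldl (fun d p => d.insert p.1 p.2) PySem.Dict.empty).getD i "")
          (((magicGroupby (PySem.List.sorted c_ids (fun p => p.2))).foldl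
              (fun d kg => d.insert kg.1 (kg.2.map (fun v => v.1))) PySem.Dict.empty).getD i []))
        PySem.Dict.empty
      = ((magicGroupby (PySem.List.sorted c_ids (fun p => p.2))).map Prod.fst).foldl
        (fun f i => f.insert ((w_ids.foldl (fun d p => d.insert p.1 p.2) PySem.Dict.empty).getD i "")
          ((c_ids.foldl (fun d p => d.modify p.2 [] (fun l => l ++ [p.1])) PySem.Dict.empty).getD i []))
        PySem.Dict.empty := by
    apply PySem.List.foldl_congr_mem
    intro acc i hi
    rw [getD_A c_ids i hi, getD_B]
  rw [h1]
  congr 1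
  apply PySem.List.foldl_congr_mem
  intro acc i _
  exact phase2_step acc _

-- ===== VERDICT (by name: the statement is the Claim_ definition above) =====
theorem magic_spec : Claim_equal_magic := by
  intro c_ids w_ids _ _
  simpa [Spec_magic] using magic_eq c_ids w_ids
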